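-- pv_equiv track=rewrite | github.com/arnaud-ant/SysAdmin | Script/__init__.py | GetStatByPage
-- ===== SOURCE A (Python) =====
-- def GetStatByPage(logs):
--
--     statByPage = {}
--
--     for line in logs:
--         if line[2][0] == "/":
--             if line[2] in statByPage.keys():
--                 statByPage[line[2]] += 1
--             else:
--                 statByPage[line[2]] = 1
--
--     return statByPage
-- ===== SOURCE B (Python) =====
-- def GetStatByPage(logs):
--     # divide and conquer: count each half independently, then merge the two dicts
--     # by adding counts; merging keeps the left half's key order and appends the
--     # right half's new keys, which is exactly first-occurrence order overall.
--     if len(logs) == 0: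
--         return {}
--     if len(logs) == 1:
--         line = logs[0]
--         return {line[2]: 1} if line[2][0] == "/" else {}
--     mid = len(logs) // 2
--     left = GetStatByPage(logs[:mid])
--     right = GetStatByPage(logs[mid:])
--     for k, v in right.items():
--         left[k] = left.get(k, 0) + v
--     return left
-- ===== Notes on version B (the rewrite author's own statement) =====
-- stated objective: alternative
-- what changed: A counts in one incremental pass keeping a counter dict; B uses divide and conquer: it recursively counts each half of the log and merges the two count dicts by adding values, which preserves first-occurrence key order.
import Mathlib
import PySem

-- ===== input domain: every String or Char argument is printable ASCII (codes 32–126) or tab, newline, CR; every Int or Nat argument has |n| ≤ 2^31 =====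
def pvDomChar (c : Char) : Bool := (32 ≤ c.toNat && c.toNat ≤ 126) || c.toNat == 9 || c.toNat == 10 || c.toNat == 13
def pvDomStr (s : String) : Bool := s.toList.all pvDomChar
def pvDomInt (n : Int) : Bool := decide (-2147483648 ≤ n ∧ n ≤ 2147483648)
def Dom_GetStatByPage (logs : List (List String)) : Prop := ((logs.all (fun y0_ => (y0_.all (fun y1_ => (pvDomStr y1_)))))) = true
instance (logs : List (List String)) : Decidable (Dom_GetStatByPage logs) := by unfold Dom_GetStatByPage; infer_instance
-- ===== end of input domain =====

-- B replaces A's single incremental counter loop by divide and conquer: each half of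
-- the log is counted recursively and the two dicts are merged by adding counts
-- (alternative decomposition, no speed claim).


-- ===== PORT A =====
-- one loop over logs maintaining the counter dict statByPage; returned as its items list
def GetStatByPage (logs : List (List String)) : List (String × Int) :=
  (logs.foldl (fun statByPage line =>
      match PySem.List.pyGet? line 2 with          -- line[2]  (none = IndexError, outside Pre_)
      | none => statByPage
      | some page =>
        match PySem.Str.pyGet? page 0 with          -- line[2][0]  (none = IndexError, outside Pre_)
        | none => statByPage
        | some c =>
          if c == '/' then
            if statByPage.contains page then        -- line[2] in statByPage.keys()
              statByPage.insert page (statByPage.getD page 0 + 1)   -- statByPage[line[2]] += 1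
            else
              statByPage.insert page 1              -- statByPage[line[2]] = 1
          else statByPage)
    PySem.Dict.empty).items

-- ===== PORT B =====
-- divide and conquer: count each half, then merge right's items into left
-- (left[k] = left.get(k,0) + v); structural recursion on a fuel bounded by the
-- list length (a totality guard only: the slices are strictly shorter)
def GetStatByPageRecAux : Nat → List (List String) → PySem.Dict String Int
  | 0, _ => PySem.Dict.empty
  | fuel + 1, logs =>
    if logs.length = 0 then PySem.Dict.empty
    else if logs.length = 1 then
      (match PySem.List.pyGet? logs 0 with            -- logs[0]
       | none => PySem.Dict.empty
       | some line =>
         match PySem.List.pyGet? line 2 with          -- line[2]  (none = IndexError, outside Pre_)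
         | none => PySem.Dict.empty
         | some page =>
           match PySem.Str.pyGet? page 0 with          -- line[2][0]  (none = IndexError, outside Pre_)
           | none => PySem.Dict.empty
           | some c =>
             if c == '/' then PySem.Dict.empty.insert page 1 else PySem.Dict.empty)
    else
      let left := GetStatByPageRecAux fuel (PySem.List.slice logs none (some (PySem.Int.floordiv (PySem.List.len logs) 2)))
      let right := GetStatByPageRecAux fuel (PySem.List.slice logs (some (PySem.Int.floordiv (PySem.List.len logs) 2)) none)
      right.items.foldl (fun d kv => d.insert kv.1 (d.getD kv.1 0 + kv.2)) left

def GetStatByPage_alt (logs : List (List String)) : List (String × Int) :=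
  (GetStatByPageRecAux logs.length logs).items

-- ===== PRECONDITION & SPEC =====
-- Pre_ excludes exactly the inputs where the Python A raises IndexError:
-- some line with fewer than 3 fields, or whose third field is the empty string.
def Pre_GetStatByPage (logs : List (List String)) : Prop :=
  ∀ line ∈ logs, 2 < line.length ∧ line.getD 2 "" ≠ ""
instance (logs : List (List String)) : Decidable (Pre_GetStatByPage logs) := by
  unfold Pre_GetStatByPage; infer_instance
def pvWitness_GetStatByPage : List (List String) :=
  [["10.0.0.1", "GET", "/index"], ["10.0.0.2", "GET", "/index"], ["10.0.0.1", "GET", "x"]]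

def Spec_GetStatByPage (logs : List (List String)) (out : List (String × Int)) : Prop := out = GetStatByPage_alt logs
instance (logs : List (List String)) (out : List (String × Int)) : Decidable (Spec_GetStatByPage logs out) := by unfold Spec_GetStatByPage; infer_instance

-- ===== CLAIM (what is proved, stated in full; the proofs are below) =====
def Claim_equal_GetStatByPage : Prop := ∀ (logs : List (List String)), Dom_GetStatByPage logs → Pre_GetStatByPage logs → Spec_GetStatByPage logs (GetStatByPage logs)

-- ===== LEMMAS AND PROOFS =====

-- the shared guard "line[2] if line[2][0] == '/'", as a selector (proof-side only)
def pvSel (line : List String) : Option String :=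
  match PySem.List.pyGet? line 2 with
  | none => none
  | some page =>
    match PySem.Str.pyGet? page 0 with
    | none => none
    | some c => if c == '/' then some page else none

-- the merge step "left[k] = left.get(k, 0) + v" (proof-side name for B's lambda)
def pvStep (d : PySem.Dict String Int) (kv : String × Int) : PySem.Dict String Int :=
  d.insert kv.1 (d.getD kv.1 0 + kv.2)

-- one increment of the counter at key x
def pvInc (d : PySem.Dict String Int) (x : String) : PySem.Dict String Int :=
  d.insert x (d.getD x 0 + 1)

-- modify at default is insert of the modified lookup (definitional)
theorem pvModifyInsert (d : PySem.Dict String Int) (k : String) (d0 : Int) (f : Int → Int) :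
    d.modify k d0 f = d.insert k (f (d.getD k d0)) := rfl

-- A's loop body is the standard "insert getD+1" counter step on the selected page
theorem pvStepA_eq (d : PySem.Dict String Int) (line : List String) :
    (match PySem.List.pyGet? line 2 with
      | none => d
      | some page =>
        match PySem.Str.pyGet? page 0 with
        | none => d
        | some c =>
          if c == '/' then
            if d.contains page then d.insert page (d.getD page 0 + 1)
            else d.insert page 1
          else d)
    = match pvSel line with
      | some page => pvInc d page
      | none => d := by
  unfold pvSel pvInc
  cases PySem.List.pyGet? line 2 with
  | none => rfl
  | some page =>
    cases h0 : PySem.Str.pyGet? page 0 with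
    | none => simp only [PySem.Str.pyGet?, PySem.Chars.pyGet?_eq_listPyGet?] at h0; simp [h0]
    | some c =>
      simp only [PySem.Str.pyGet?, PySem.Chars.pyGet?_eq_listPyGet?] at h0 ⊢
      simp only [h0]
      by_cases hc : c == '/'
      · by_cases hm : d.contains page
        · simp [hc, hm]
        · simp only [Bool.not_eq_true] at hm
          simp [hc, hm, PySem.Dict.getD_of_not_contains d 0 hm]
      · simp [hc]

-- A computes Counter(pages).items
theorem pvA_eq_counter (logs : List (List String)) :
    GetStatByPage logs = (PySem.Dict.counter (logs.filterMap pvSel)).items := by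
  unfold GetStatByPage
  rw [← PySem.Dict.foldl_insert_getD_add_one_eq_counter]
  rw [List.foldl_filterMap]
  refine congrArg PySem.Dict.items (PySem.List.foldl_congr_mem _ _ _ _ ?_)
  intro d line _
  rw [pvStepA_eq d line]
  cases pvSel line <;> rfl

-- two inserts at distinct keys commute when the first key is already present (in-place update)
theorem pvInsertComm (d : PySem.Dict String Int) (x k : String) (a b : Int)
    (hx : d.contains x = true) (hne : k ≠ x) :
    (d.insert x a).insert k b = (d.insert k b).insert x a := by
  have hkx : (k == x) = false := beq_false_of_ne hne
  have hxk : (x == k) = false := beq_false_of_ne (Ne.symm hne)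
  have hcx : (d.insert k b).contains x = true := by
    rw [PySem.Dict.contains_insert, hxk, Bool.false_or]; exact hx
  apply PySem.Dict.ext
  by_cases hk : d.contains k = true
  · have hck : (d.insert x a).contains k = true := by
      rw [PySem.Dict.contains_insert, hkx, Bool.false_or]; exact hk
    rw [PySem.Dict.items_insert_of_contains _ _ hck, PySem.Dict.items_insert_of_contains _ _ hx,
        PySem.Dict.items_insert_of_contains _ _ hcx, PySem.Dict.items_insert_of_contains _ _ hk,
        List.map_map, List.map_map]
    refine List.map_congr_left ?_
    intro p _
    by_cases h1 : (p.1 == x) = true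
    · have : p.1 = x := eq_of_beq h1
      simp [Function.comp, this, hxk]
    · simp only [Bool.not_eq_true] at h1
      by_cases h2 : (p.1 == k) = true
      · have : p.1 = k := eq_of_beq h2
        simp [Function.comp, this, hkx]
      · simp only [Bool.not_eq_true] at h2
        simp [Function.comp, h1, h2]
  · have hck : (d.insert x a).contains k = false := by
      rw [PySem.Dict.contains_insert, hkx, Bool.false_or]; simpa using hk
    simp only [Bool.not_eq_true] at hk
    rw [PySem.Dict.items_insert_of_not_contains _ _ hck, PySem.Dict.items_insert_of_contains _ _ hx,
        PySem.Dict.items_insert_of_contains _ _ hcx, PySem.Dict.items_insert_of_not_contains _ _ hk,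
        List.map_append]
    simp
    intro h
    exact absurd h hne

-- folding B's merge step over pairs whose keys avoid x commutes with an increment at x
theorem pvFoldStep_inc_comm (x : String) (l : List (String × Int)) :
    ∀ (d : PySem.Dict String Int), (∀ q ∈ l, q.1 ≠ x) → d.contains x = true →
      l.foldl pvStep (pvInc d x) = pvInc (l.foldl pvStep d) x := by
  induction l with
  | nil => intro d _ _; rfl
  | cons q l ih =>
    intro d hl hc
    have hq : q.1 ≠ x := hl q (List.mem_cons_self ..)
    have h1 : pvStep (pvInc d x) q = pvInc (pvStep d q) x := by
      unfold pvStep pvInc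
      rw [PySem.Dict.getD_insert_of_ne _ _ _ hq, PySem.Dict.getD_insert_of_ne _ _ _ (Ne.symm hq)]
      exact pvInsertComm d x q.1 (d.getD x 0 + 1) (d.getD q.1 0 + q.2) hc hq
    have hc' : (pvStep d q).contains x = true := by
      unfold pvStep
      rw [PySem.Dict.contains_insert]
      rw [hc]; simp
    simp only [List.foldl_cons, h1]
    exact ih (pvStep d q) (fun p hp => hl p (List.mem_cons_of_mem _ hp)) hc'

-- bumping the value stored at x inside an items list, then merging, is merging then incrementing
theorem pvFoldStep_bump (x : String) :
    ∀ (l : List (String × Int)) (d : PySem.Dict String Int),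
      (l.map Prod.fst).Nodup → x ∈ l.map Prod.fst →
      (l.map (fun p => if p.1 == x then (x, p.2 + 1) else p)).foldl pvStep d
        = pvInc (l.foldl pvStep d) x := by
  intro l
  induction l with
  | nil => intro d _ hx; simp at hx
  | cons p l ih =>
    intro d hnd hx
    by_cases hp : (p.1 == x) = true
    · have hpx : p.1 = x := eq_of_beq hp
      have hxl : x ∉ l.map Prod.fst := by
        simp only [List.map_cons, List.nodup_cons] at hnd
        rw [← hpx]; exact hnd.1
      have hmap : l.map (fun p => if p.1 == x then (x, p.2 + 1) else p) = l := by
        refine List.map_congr_left ?_ |>.trans (List.map_id l)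
        intro q hq
        have : q.1 ≠ x := fun h => hxl (h ▸ List.mem_map_of_mem hq)
        simp [beq_false_of_ne this]
      simp only [List.map_cons, hp, if_true, List.foldl_cons, hmap]
      have hstep : pvStep d (x, p.2 + 1) = pvInc (pvStep d p) x := by
        unfold pvStep pvInc
        simp only [hpx]
        rw [PySem.Dict.getD_insert_self, PySem.Dict.insert_insert_self]
        ring_nf
      rw [hstep]
      have hl : ∀ q ∈ l, q.1 ≠ x := fun q hq h => hxl (h ▸ List.mem_map_of_mem hq)
      have hc : (pvStep d p).contains x = true := by
        unfold pvStep; rw [hpx]; exact PySem.Dict.contains_insert_self ..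
      exact pvFoldStep_inc_comm x l (pvStep d p) hl hc
    · have hpx : p.1 ≠ x := fun h => hp (beq_of_eq h)
      have hx' : x ∈ l.map Prod.fst := by
        rcases List.mem_map.mp hx with ⟨q, hq, hq1⟩
        rcases List.mem_cons.mp hq with h | h
        · exact absurd (h ▸ hq1) hpx
        · exact hq1 ▸ List.mem_map_of_mem h
      have hnd' : (l.map Prod.fst).Nodup := by
        simp only [List.map_cons, List.nodup_cons] at hnd; exact hnd.2
      simp only [List.map_cons, hp, List.foldl_cons]
      exact ih (pvStep d p) hnd' hx'

-- merging Counter(b) into d is counting b into d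
theorem pvMerge_counter (b : List String) :
    ∀ (d : PySem.Dict String Int),
      (PySem.Dict.counter b).items.foldl pvStep d
        = b.foldl (fun d x => d.modify x 0 (· + 1)) d := by
  induction b using List.reverseRecOn with
  | nil => intro d; rfl
  | append_singleton bs x ih =>
    intro d
    rw [PySem.Dict.counter_append_singleton, List.foldl_append]
    rw [pvModifyInsert]
    simp only [List.foldl_cons, List.foldl_nil]
    set e := PySem.Dict.counter bs with he
    have hnd : e.keys.Nodup := PySem.Dict.nodup_keys_counter bs
    have hkeys : e.keys = e.items.map Prod.fst := by simp only [PySem.Dict.keys]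
    by_cases hcx : e.contains x = true
    · rw [PySem.Dict.items_insert_of_contains _ _ hcx]
      have hmem : x ∈ e.items.map Prod.fst := by
        rw [← hkeys]; exact (PySem.Dict.contains_iff_mem_keys e x).mp hcx
      have hmap : e.items.map (fun p => if (p.1 == x) = true then (x, e.getD x 0 + 1) else p)
          = e.items.map (fun p => if (p.1 == x) = true then (x, p.2 + 1) else p) := by
        refine List.map_congr_left ?_
        intro p hp
        by_cases h1 : (p.1 == x) = true
        · have hpx : p.1 = x := eq_of_beq h1
          have hpm : (x, p.2) ∈ e.items := by rw [← hpx]; exact hp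
          have : e.getD x 0 = p.2 := PySem.Dict.getD_of_mem_items e hpm hnd 0
          simp [h1, this]
        · simp [h1]
      rw [hmap, pvFoldStep_bump x e.items d (hkeys ▸ hnd) hmem, ih d]
      rfl
    · have hcx' : e.contains x = false := by simpa using hcx
      rw [PySem.Dict.items_insert_of_not_contains _ _ hcx', List.foldl_append,
          PySem.Dict.getD_of_not_contains _ _ hcx']
      rw [ih d]
      show pvStep _ (x, 0 + 1) = _
      unfold pvStep
      norm_num
      rfl

-- B's recursion computes Counter of the selected pages
theorem pvSliceTo {α : Type} (xs : List α) :
    PySem.List.slice xs none (some (PySem.Int.floordiv (PySem.List.len xs) 2)) = xs.take (xs.length / 2) := by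
  have h : PySem.Int.floordiv (PySem.List.len xs) 2 = ((xs.length / 2 : Nat) : Int) := by
    simp only [PySem.List.len_eq]
    exact_mod_cast PySem.Int.floordiv_natCast xs.length 2
  rw [h, PySem.List.slice_to_natCast]

theorem pvSliceFrom {α : Type} (xs : List α) :
    PySem.List.slice xs (some (PySem.Int.floordiv (PySem.List.len xs) 2)) none = xs.drop (xs.length / 2) := by
  have h : PySem.Int.floordiv (PySem.List.len xs) 2 = ((xs.length / 2 : Nat) : Int) := by
    simp only [PySem.List.len_eq]
    exact_mod_cast PySem.Int.floordiv_natCast xs.length 2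
  rw [h, PySem.List.slice_from_natCast]

-- B's recursion computes Counter of the selected pages (any sufficient fuel)
theorem pvRecAux_eq_counter (fuel : Nat) :
    ∀ (logs : List (List String)), logs.length ≤ fuel →
      GetStatByPageRecAux fuel logs = PySem.Dict.counter (logs.filterMap pvSel) := by
  induction fuel with
  | zero =>
    intro logs hlen
    have : logs = [] := List.length_eq_zero_iff.mp (Nat.le_zero.mp hlen)
    subst this
    rfl
  | succ fuel ih =>
    intro logs hlen
    by_cases h0 : logs.length = 0
    · have : logs = [] := List.length_eq_zero_iff.mp h0
      subst this
      rfl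
    · by_cases h1 : logs.length = 1
      · obtain ⟨line, rfl⟩ := List.length_eq_one_iff.mp h1
        rw [GetStatByPageRecAux, if_neg h0, if_pos h1, PySem.List.pyGet?_zero_cons]
        cases h2 : PySem.List.pyGet? line 2 with
        | none => simp [h2, pvSel]; rfl
        | some page =>
          cases h3 : PySem.Str.pyGet? page 0 with
          | none =>
            simp only [PySem.Str.pyGet?, PySem.Chars.pyGet?_eq_listPyGet?] at h3
            simp [h2, h3, pvSel]
            rfl
          | some c =>
            by_cases hc : (c == '/') = true
            · have hceq : c = '/' := eq_of_beq hc
              simp only [h2, h3, hceq, List.filterMap_cons, List.filterMap_nil, pvSel]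
              simp only [beq_self_eq_true, if_true, PySem.Dict.counter_eq_foldl,
                List.foldl_cons, List.foldl_nil]
              rw [pvModifyInsert, PySem.Dict.getD_empty]
              norm_num
            · have hcne : c ≠ '/' := fun h => hc (by simp [h])
              simp only [PySem.Str.pyGet?, PySem.Chars.pyGet?_eq_listPyGet?] at h3
              simp [h2, h3, hcne, pvSel]
              rfl
      · rw [GetStatByPageRecAux, if_neg h0, if_neg h1]
        have h2le : 2 ≤ logs.length := by omega
        have hlen1 : logs.length ≤ fuel + 1 := hlen
        simp only [pvSliceTo, pvSliceFrom]
        rw [ih (logs.take (logs.length / 2)) (by simp [List.length_take]; omega),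
            ih (logs.drop (logs.length / 2)) (by simp [List.length_drop]; omega)]
        rw [show (fun (d : PySem.Dict String Int) (kv : String × Int) => d.insert kv.1 (d.getD kv.1 0 + kv.2)) = pvStep from rfl]
        rw [pvMerge_counter]
        rw [PySem.Dict.counter_eq_foldl, ← List.foldl_append, ← List.filterMap_append,
          List.take_append_drop, ← PySem.Dict.counter_eq_foldl]

-- ===== VERDICT (by name: the statement is the Claim_ definition above) =====
theorem GetStatByPage_spec : Claim_equal_GetStatByPage := by
  intro logs _ _
  unfold Spec_GetStatByPage GetStatByPage_alt
  rw [pvA_eq_counter, pvRecAux_eq_counter logs.length logs le_rfl]
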